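-- pv_equiv track=rewrite | github.com/mohamedirsath07/Clazzy | clazzy_v2/core/vision/classifier.py | _get_category
-- ===== SOURCE A (Python) =====
-- def _get_category(clothing_type: str) -> str:
--     """Map clothing type to category"""
--     category_map = {
--         "top": ["t-shirt", "shirt", "blouse", "polo", "sweater", "hoodie",
--                "tank-top", "crop-top", "cardigan", "turtleneck"],
--         "bottom": ["jeans", "trousers", "shorts", "skirt", "chinos", "joggers",
--                   "leggings", "cargo-pants", "culottes"],
--         "outerwear": ["jacket", "blazer", "coat", "windbreaker", "vest",
--                      "denim-jacket", "leather-jacket", "parka", "bomber-jacket"],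
--         "dress": ["casual-dress", "formal-dress", "maxi-dress", "mini-dress",
--                  "midi-dress", "sundress", "cocktail-dress"],
--         "footwear": ["sneakers", "boots", "loafers", "sandals", "heels",
--                     "flats", "oxford-shoes", "espadrilles"],
--         "accessory": ["belt", "watch", "hat", "scarf", "bag", "sunglasses"]
--     }
--
--     for category, types in category_map.items():
--         if clothing_type in types:
--             return category
--     return "unknown"
-- ===== SOURCE B (Python) =====
-- _CATEGORY_OF = {
--     "t-shirt": "top", "shirt": "top", "blouse": "top", "polo": "top",
--     "sweater": "top", "hoodie": "top", "tank-top": "top", "crop-top": "top",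
--     "cardigan": "top", "turtleneck": "top",
--     "jeans": "bottom", "trousers": "bottom", "shorts": "bottom",
--     "skirt": "bottom", "chinos": "bottom", "joggers": "bottom",
--     "leggings": "bottom", "cargo-pants": "bottom", "culottes": "bottom",
--     "jacket": "outerwear", "blazer": "outerwear", "coat": "outerwear",
--     "windbreaker": "outerwear", "vest": "outerwear",
--     "denim-jacket": "outerwear", "leather-jacket": "outerwear",
--     "parka": "outerwear", "bomber-jacket": "outerwear",
--     "casual-dress": "dress", "formal-dress": "dress", "maxi-dress": "dress",
--     "mini-dress": "dress", "midi-dress": "dress", "sundress": "dress",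
--     "cocktail-dress": "dress",
--     "sneakers": "footwear", "boots": "footwear", "loafers": "footwear",
--     "sandals": "footwear", "heels": "footwear", "flats": "footwear",
--     "oxford-shoes": "footwear", "espadrilles": "footwear",
--     "belt": "accessory", "watch": "accessory", "hat": "accessory",
--     "scarf": "accessory", "bag": "accessory", "sunglasses": "accessory",
-- }
--
-- def _get_category(clothing_type: str) -> str:
--     """Map clothing type to category"""
--     return _CATEGORY_OF.get(clothing_type, "unknown")
-- ===== Notes on version B (the rewrite author's own statement) =====
-- stated objective: idiomatic
-- what changed: Replaces the loop over category lists with per-list membership scans by one precomputed inverted dict mapping each type to its category, returned via a single .get with default 'unknown'.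
import Mathlib
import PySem

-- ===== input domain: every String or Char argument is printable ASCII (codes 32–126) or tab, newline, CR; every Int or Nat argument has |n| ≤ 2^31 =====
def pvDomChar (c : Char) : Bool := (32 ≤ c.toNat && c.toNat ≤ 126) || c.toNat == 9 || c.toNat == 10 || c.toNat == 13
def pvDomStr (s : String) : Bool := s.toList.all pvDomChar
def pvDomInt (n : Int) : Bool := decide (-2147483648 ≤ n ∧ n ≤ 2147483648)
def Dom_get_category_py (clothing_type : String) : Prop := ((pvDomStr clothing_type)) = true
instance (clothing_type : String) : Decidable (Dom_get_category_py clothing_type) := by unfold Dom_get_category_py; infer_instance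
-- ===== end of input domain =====

-- B replaces A's loop over category lists (membership scan per list) by a single
-- precomputed inverted dictionary lookup with default "unknown" (idiomatic, one lookup).


-- ===== PORT A =====
-- A's dict literal (distinct keys), iterated via .items()
def pvCategoryMap : PySem.Dict String (List String) :=
  PySem.Dict.ofList [
    ("top", ["t-shirt", "shirt", "blouse", "polo", "sweater", "hoodie",
             "tank-top", "crop-top", "cardigan", "turtleneck"]),
    ("bottom", ["jeans", "trousers", "shorts", "skirt", "chinos", "joggers",
                "leggings", "cargo-pants", "culottes"]),
    ("outerwear", ["jacket", "blazer", "coat", "windbreaker", "vest",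
                   "denim-jacket", "leather-jacket", "parka", "bomber-jacket"]),
    ("dress", ["casual-dress", "formal-dress", "maxi-dress", "mini-dress",
               "midi-dress", "sundress", "cocktail-dress"]),
    ("footwear", ["sneakers", "boots", "loafers", "sandals", "heels",
                  "flats", "oxford-shoes", "espadrilles"]),
    ("accessory", ["belt", "watch", "hat", "scarf", "bag", "sunglasses"])]

-- the 'for category, types in category_map.items(): if clothing_type in types: return category' loop
def pvLoopA : List (String × List String) → String → String
  | [], _ => "unknown"
  | (category, types) :: rest, s => if s ∈ types then category else pvLoopA rest s

def get_category_py (clothing_type : String) : String :=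
  pvLoopA pvCategoryMap.items clothing_type

-- ===== PORT B =====
-- B's precomputed inverted dict literal (insertion order as written in Source B)
def pvCategoryOf : PySem.Dict String String :=
  PySem.Dict.ofList [
    ("t-shirt", "top"), ("shirt", "top"), ("blouse", "top"), ("polo", "top"),
    ("sweater", "top"), ("hoodie", "top"), ("tank-top", "top"), ("crop-top", "top"),
    ("cardigan", "top"), ("turtleneck", "top"),
    ("jeans", "bottom"), ("trousers", "bottom"), ("shorts", "bottom"),
    ("skirt", "bottom"), ("chinos", "bottom"), ("joggers", "bottom"),
    ("leggings", "bottom"), ("cargo-pants", "bottom"), ("culottes", "bottom"),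
    ("jacket", "outerwear"), ("blazer", "outerwear"), ("coat", "outerwear"),
    ("windbreaker", "outerwear"), ("vest", "outerwear"),
    ("denim-jacket", "outerwear"), ("leather-jacket", "outerwear"),
    ("parka", "outerwear"), ("bomber-jacket", "outerwear"),
    ("casual-dress", "dress"), ("formal-dress", "dress"), ("maxi-dress", "dress"),
    ("mini-dress", "dress"), ("midi-dress", "dress"), ("sundress", "dress"),
    ("cocktail-dress", "dress"),
    ("sneakers", "footwear"), ("boots", "footwear"), ("loafers", "footwear"),
    ("sandals", "footwear"), ("heels", "footwear"), ("flats", "footwear"),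
    ("oxford-shoes", "footwear"), ("espadrilles", "footwear"),
    ("belt", "accessory"), ("watch", "accessory"), ("hat", "accessory"),
    ("scarf", "accessory"), ("bag", "accessory"), ("sunglasses", "accessory")]

def get_category_py_alt (clothing_type : String) : String :=
  pvCategoryOf.getD clothing_type "unknown"

-- ===== PRECONDITION & SPEC =====
def Spec_get_category_py (clothing_type : String) (out : String) : Prop := out = get_category_py_alt clothing_type
instance (clothing_type : String) (out : String) : Decidable (Spec_get_category_py clothing_type out) := by unfold Spec_get_category_py; infer_instance

-- ===== CLAIM (what is proved, stated in full; the proofs are below) =====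
def Claim_equal_get_category_py : Prop := ∀ (clothing_type : String), Dom_get_category_py clothing_type → Spec_get_category_py clothing_type (get_category_py clothing_type)

-- ===== LEMMAS AND PROOFS =====

-- getD on a literal dict peels one pair off the front
theorem pv_getD_mk_cons (k v : String) (rest : List (String × String)) (s d : String) :
    (PySem.Dict.mk ((k, v) :: rest)).getD s d
      = if k == s then v else (PySem.Dict.mk rest).getD s d := by
  rw [PySem.Dict.getD_eq_get?_getD, PySem.Dict.get?_mk_cons]
  by_cases h : k == s
  · simp [h]
  · simp [h, PySem.Dict.getD_eq_get?_getD]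

-- looking up s in a block of pairs (t, c) for t ∈ types is the membership test
theorem pv_getD_block (types : List String) (c : String)
    (rest : List (String × String)) (s : String) :
    (PySem.Dict.mk (types.map (fun t => (t, c)) ++ rest)).getD s "unknown"
      = if s ∈ types then c else (PySem.Dict.mk rest).getD s "unknown" := by
  induction types with
  | nil => simp
  | cons t ts ih =>
      simp only [List.map_cons, List.cons_append, pv_getD_mk_cons, ih]
      by_cases h : t = s
      · simp [h]
      · have h' : (t == s) = false := by simp [h]
        have hs : ¬ s = t := fun hst => h hst.symm
        simp [h', List.mem_cons, hs]

-- A's loop over grouped items equals lookup in the flattened inverted list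
theorem pv_loop_eq_flat (items : List (String × List String)) (s : String) :
    pvLoopA items s
      = (PySem.Dict.mk (items.flatMap fun p => p.2.map (fun t => (t, p.1)))).getD s "unknown" := by
  induction items with
  | nil =>
      simp [pvLoopA, PySem.Dict.getD_eq_get?_getD]
      rfl
  | cons p rest ih =>
      obtain ⟨c, types⟩ := p
      simp only [pvLoopA, List.flatMap_cons, pv_getD_block, ih]

-- ===== VERDICT (by name: the statement is the Claim_ definition above) =====
set_option maxRecDepth 8192 in
theorem get_category_py_spec : Claim_equal_get_category_py := by
  intro s _
  show get_category_py s = get_category_py_alt s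
  unfold get_category_py get_category_py_alt
  rw [pv_loop_eq_flat]
  have h : (PySem.Dict.mk ((pvCategoryMap.items).flatMap fun p => p.2.map (fun t => (t, p.1)))) = pvCategoryOf := by decide
  rw [h]
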